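-- pv_equiv track=rewrite | github.com/amavel-git/sofia-ai-assistant | app/optimize_internal_link_anchors.py | validate_ai_links
-- ===== SOURCE A (Python) =====
-- def validate_ai_links(ai_links, allowed_targets):
--     allowed_urls = {item["target_url"] for item in allowed_targets}
--     validated = []
--
--     seen = set()
--
--     for link in ai_links:
--         target_url = link.get("target_url", "")
--         anchor_text = link.get("anchor_text", "").strip()
--
--         if target_url not in allowed_urls:
--             continue
--
--         if target_url in seen:
--             continue
--
--         if not anchor_text:
--             continue
--
--         validated.append({
--             "target_url": target_url,
--             "anchor_text": anchor_text,
--             "reason": link.get("reason", "")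
--         })
--
--         seen.add(target_url)
--
--         if len(validated) >= 3:
--             break
--
--     return validated
-- ===== SOURCE B (Python) =====
-- def validate_ai_links(ai_links, allowed_targets):
--     # For each allowed url, find the index of its first usable occurrence in
--     # ai_links; order those hits by index and keep the first three.
--     def first_valid_index(url):
--         for i, link in enumerate(ai_links):
--             if link.get("target_url", "") == url and link.get("anchor_text", "").strip():
--                 return i
--         return None
--
--     hits = []
--     for url in {item["target_url"] for item in allowed_targets}:
--         i = first_valid_index(url)
--         if i is not None:
--             hits.append((i, url))
--     hits.sort(key=lambda h: h[0])
--
--     out = []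
--     for i, url in hits[:3]:
--         link = ai_links[i]
--         out.append({"target_url": url,
--                     "anchor_text": link.get("anchor_text", "").strip(),
--                     "reason": link.get("reason", "")})
--     return out
-- ===== Notes on version B (the rewrite author's own statement) =====
-- stated objective: alternative
-- what changed: A's single streaming pass with a mutable seen-set and break is replaced by a per-url algorithm: for each allowed url find the index of its first usable occurrence in ai_links, sort those (index, url) hits by index, and keep the first three.
import Mathlib
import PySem

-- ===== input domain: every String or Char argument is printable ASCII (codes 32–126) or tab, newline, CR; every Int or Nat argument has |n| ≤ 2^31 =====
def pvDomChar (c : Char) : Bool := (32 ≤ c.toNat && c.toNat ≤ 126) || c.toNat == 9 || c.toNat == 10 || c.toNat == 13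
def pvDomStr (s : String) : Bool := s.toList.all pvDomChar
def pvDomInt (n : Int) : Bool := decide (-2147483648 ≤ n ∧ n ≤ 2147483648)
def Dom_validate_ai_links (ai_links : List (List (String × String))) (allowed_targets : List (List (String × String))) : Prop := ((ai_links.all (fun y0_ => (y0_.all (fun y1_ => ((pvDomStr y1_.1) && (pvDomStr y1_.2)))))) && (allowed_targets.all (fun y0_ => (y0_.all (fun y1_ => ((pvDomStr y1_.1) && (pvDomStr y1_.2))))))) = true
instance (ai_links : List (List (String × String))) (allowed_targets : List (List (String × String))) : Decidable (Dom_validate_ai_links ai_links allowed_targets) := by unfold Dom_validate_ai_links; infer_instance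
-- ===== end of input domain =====

-- B replaces A's single streaming pass (seen-set + break) by a per-url algorithm:
-- for each allowed url find the index of its first usable occurrence, sort the
-- hits by index, keep the first three. Alternative algorithm, no speed claim.

-- ===== PORT A =====

-- link.get(k, dflt) — dicts are association lists, lookup = first match
def pvGet (link : List (String × String)) (k dflt : String) : String :=
  (PySem.Dict.mk link).getD k dflt

-- {item["target_url"] for item in allowed_targets}; item["target_url"] raises KeyError
-- when the key is missing — those inputs are excluded by Pre_, so getD "" is a total stand-in
def pvAllowedUrls (allowed_targets : List (List (String × String))) : PySem.Set String :=
  PySem.Set.ofList (allowed_targets.map (fun item => pvGet item "target_url" ""))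

-- A's for-loop with early break, as structural recursion over the same state (validated, seen)
def pvLoopA (allowed : PySem.Set String) :
    List (List (String × String)) → List (List (String × String)) → PySem.Set String →
    List (List (String × String))
  | [], validated, _ => validated
  | link :: rest, validated, seen =>
    let target_url := pvGet link "target_url" ""
    let anchor_text := PySem.Str.strip (pvGet link "anchor_text" "")
    if ¬ PySem.Set.contains allowed target_url then pvLoopA allowed rest validated seen
    else if PySem.Set.contains seen target_url then pvLoopA allowed rest validated seen
    else if anchor_text = "" then pvLoopA allowed rest validated seen
    else
      let validated' := validated ++
        [[("target_url", target_url), ("anchor_text", anchor_text), ("reason", pvGet link "reason" "")]]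
      if validated'.length ≥ 3 then validated'
      else pvLoopA allowed rest validated' (PySem.Set.add seen target_url)

def validate_ai_links (ai_links : List (List (String × String))) (allowed_targets : List (List (String × String))) : List (List (String × String)) :=
  pvLoopA (pvAllowedUrls allowed_targets) ai_links [] PySem.Set.empty

-- ===== PORT B =====

-- the inner 'for i, link in enumerate(ai_links): if …: return i / return None'
def pvFirstValidIndex (ai_links : List (List (String × String))) (url : String) : Option Nat :=
  ai_links.findIdx? (fun link =>
    pvGet link "target_url" "" == url && !(PySem.Str.strip (pvGet link "anchor_text" "") == ""))

-- the body of B's output loop: build the dict for one hit (i, url)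
def pvMkOut (ai_links : List (List (String × String))) (h : Nat × String) : List (String × String) :=
  let link := ai_links.getD h.1 []
  [("target_url", h.2),
   ("anchor_text", PySem.Str.strip (pvGet link "anchor_text" "")),
   ("reason", pvGet link "reason" "")]

def validate_ai_links_alt (ai_links : List (List (String × String))) (allowed_targets : List (List (String × String))) : List (List (String × String)) :=
  -- iterating the set here is safe: the result is re-ordered by the sort on distinct indices
  let hits := (pvAllowedUrls allowed_targets).filterMap
      (fun url => (pvFirstValidIndex ai_links url).map (fun i => (i, url)))
  let sortedHits := PySem.List.sorted hits (fun h => h.1) false   -- hits.sort(key=lambda h: h[0])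
  (sortedHits.take 3).map (pvMkOut ai_links)                      -- the output loop over hits[:3]

-- ===== PRECONDITION & SPEC =====
-- Pre_ excludes exactly the inputs where an allowed_targets item lacks "target_url":
-- there A (and B alike) raises KeyError on item["target_url"].
def Pre_validate_ai_links (ai_links : List (List (String × String))) (allowed_targets : List (List (String × String))) : Prop :=
  allowed_targets.all (fun item => (PySem.Dict.mk item).contains "target_url") = true
instance (ai_links : List (List (String × String))) (allowed_targets : List (List (String × String))) : Decidable (Pre_validate_ai_links ai_links allowed_targets) := by unfold Pre_validate_ai_links; infer_instance

def pvWitness_validate_ai_links : (List (List (String × String))) × (List (List (String × String))) :=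
  ([[("target_url", "u"), ("anchor_text", " a ")]], [[("target_url", "u")]])

def Spec_validate_ai_links (ai_links : List (List (String × String))) (allowed_targets : List (List (String × String))) (out : List (List (String × String))) : Prop := out = validate_ai_links_alt ai_links allowed_targets
instance (ai_links : List (List (String × String))) (allowed_targets : List (List (String × String))) (out : List (List (String × String))) : Decidable (Spec_validate_ai_links ai_links allowed_targets out) := by unfold Spec_validate_ai_links; infer_instance

-- ===== CLAIM (what is proved, stated in full; the proofs are below) =====
def Claim_equal_validate_ai_links : Prop := ∀ (ai_links : List (List (String × String))) (allowed_targets : List (List (String × String))), Dom_validate_ai_links ai_links allowed_targets → Pre_validate_ai_links ai_links allowed_targets → Spec_validate_ai_links ai_links allowed_targets (validate_ai_links ai_links allowed_targets)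

-- ===== LEMMAS AND PROOFS =====

-- the candidate record A appends for a valid link
def pvMkCand (link : List (String × String)) : List (String × String) :=
  [("target_url", pvGet link "target_url" ""),
   ("anchor_text", PySem.Str.strip (pvGet link "anchor_text" "")),
   ("reason", pvGet link "reason" "")]

def pvKeyOf (c : List (String × String)) : String :=
  (PySem.Dict.mk c).getD "target_url" ""

-- first-occurrence dedupe of a candidate list, relative to an already-seen key list
def pvDedupFrom (seen : List String) : List (List (String × String)) → List (List (String × String))
  | [] => []
  | c :: rest =>
    if pvKeyOf c ∈ seen then pvDedupFrom seen rest
    else c :: pvDedupFrom (seen ++ [pvKeyOf c]) rest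

theorem pvKeyOf_mkCand (link : List (String × String)) :
    pvKeyOf (pvMkCand link) = pvGet link "target_url" "" := by
  simp [pvKeyOf, pvMkCand, PySem.Dict.getD, PySem.Dict.get?_mk_cons]

-- the indexed first-occurrence list: (index, link) of each valid link whose url is new
def pvG (allowed : PySem.Set String) :
    Nat → List (List (String × String)) → List String → List (Nat × List (String × String))
  | _, [], _ => []
  | i, l :: rest, seen =>
    if PySem.Set.contains allowed (pvGet l "target_url" "") ∧
       PySem.Str.strip (pvGet l "anchor_text" "") ≠ "" ∧
       pvGet l "target_url" "" ∉ seen then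
      (i, l) :: pvG allowed (i + 1) rest (seen ++ [pvGet l "target_url" ""])
    else pvG allowed (i + 1) rest seen

-- A's loop computes: validated ++ the next (3 - |validated|) deduped candidates
theorem pvLoopA_eq (allowed : PySem.Set String) :
    ∀ (links : List (List (String × String))) (validated : List (List (String × String)))
      (seen : PySem.Set String), validated.length < 3 →
    pvLoopA allowed links validated seen =
      validated ++ (pvDedupFrom seen
        ((links.filter (fun link =>
            PySem.Set.contains allowed (pvGet link "target_url" "") &&
            !(PySem.Str.strip (pvGet link "anchor_text" "") = ""))).map pvMkCand)).take
        (3 - validated.length) := by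
  intro links
  induction links with
  | nil => intro validated seen _; simp [pvLoopA, pvDedupFrom]
  | cons link rest ih =>
    intro validated seen hlen
    by_cases hA : PySem.Set.contains allowed (pvGet link "target_url" "") = true
    · have hA' : pvGet link "target_url" "" ∈ allowed := (PySem.Set.contains_iff _ _).mp hA
      by_cases hE : PySem.Str.strip (pvGet link "anchor_text" "") = ""
      · simp [pvLoopA, hA', hE, ih validated seen hlen]
      · by_cases hS : PySem.Set.contains seen (pvGet link "target_url" "") = true
        · have hS' : pvGet link "target_url" "" ∈ seen := (PySem.Set.contains_iff _ _).mp hS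
          simp [pvLoopA, hA', hS', hE, pvDedupFrom, pvKeyOf_mkCand,
            ih validated seen hlen]
        · have hS' : pvGet link "target_url" "" ∉ seen := fun h => hS ((PySem.Set.contains_iff _ _).mpr h)
          have hSf : PySem.Set.contains seen (pvGet link "target_url" "") = false := by
            simpa using hS
          have hfc : List.filter (fun link =>
                PySem.Set.contains allowed (pvGet link "target_url" "") &&
                !(PySem.Str.strip (pvGet link "anchor_text" "") = "")) (link :: rest) =
              link :: List.filter (fun link =>
                PySem.Set.contains allowed (pvGet link "target_url" "") &&
                !(PySem.Str.strip (pvGet link "anchor_text" "") = "")) rest :=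
            List.filter_cons_of_pos (by simp [hA', hE])
          rw [hfc]
          simp only [pvLoopA, List.map_cons]
          rw [if_neg (by simpa using hA), if_neg (by simpa using hSf), if_neg hE]
          have hdd : pvDedupFrom seen (pvMkCand link :: (rest.filter (fun link =>
                  PySem.Set.contains allowed (pvGet link "target_url" "") &&
                  !(PySem.Str.strip (pvGet link "anchor_text" "") = ""))).map pvMkCand) =
              pvMkCand link :: pvDedupFrom (seen ++ [pvGet link "target_url" ""])
                ((rest.filter (fun link =>
                  PySem.Set.contains allowed (pvGet link "target_url" "") &&
                  !(PySem.Str.strip (pvGet link "anchor_text" "") = ""))).map pvMkCand) := by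
            simp [pvDedupFrom, pvKeyOf_mkCand, hS']
          rw [hdd]
          have htake : ∀ t : List (List (String × String)),
              (pvMkCand link :: t).take (3 - validated.length) =
              pvMkCand link :: t.take (3 - (validated.length + 1)) := by
            intro t
            have h3 : 3 - validated.length = (3 - (validated.length + 1)) + 1 := by omega
            rw [h3, List.take_succ_cons]
          rw [htake]
          by_cases hfull : validated.length + 1 ≥ 3
          · have h2 : validated.length = 2 := by omega
            have h0 : 3 - (validated.length + 1) = 0 := by omega
            simp only [List.length_append, List.length_cons, List.length_nil, h0, List.take_zero]
            rw [if_pos (by simp [h2])]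
            simp [pvMkCand]
          · have hlt : ¬ ((validated ++
                [[("target_url", pvGet link "target_url" ""),
                  ("anchor_text", PySem.Str.strip (pvGet link "anchor_text" "")),
                  ("reason", pvGet link "reason" "")]]).length ≥ 3) := by
              simp; omega
            rw [if_neg hlt]
            rw [PySem.Set.add_of_not_mem hS']
            have hlen' : (validated ++
                [[("target_url", pvGet link "target_url" ""),
                  ("anchor_text", PySem.Str.strip (pvGet link "anchor_text" "")),
                  ("reason", pvGet link "reason" "")]]).length < 3 := by
              simp; omega
            rw [ih _ _ hlen']
            simp [pvMkCand]
    · have hA' : pvGet link "target_url" "" ∉ allowed := fun h => hA ((PySem.Set.contains_iff _ _).mpr h)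
      simp [pvLoopA, hA', ih validated seen hlen]

-- pvG's mapped candidates are exactly the dedupe of the filtered candidate list
theorem pvG_dedup (allowed : PySem.Set String) :
    ∀ (rest : List (List (String × String))) (i : Nat) (seen : List String),
    (pvG allowed i rest seen).map (fun p => pvMkCand p.2) =
      pvDedupFrom seen ((rest.filter (fun link =>
        PySem.Set.contains allowed (pvGet link "target_url" "") &&
        !(PySem.Str.strip (pvGet link "anchor_text" "") = ""))).map pvMkCand) := by
  intro rest
  induction rest with
  | nil => intro i seen; simp [pvG, pvDedupFrom]
  | cons l t ih =>
    intro i seen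
    by_cases hA : PySem.Set.contains allowed (pvGet l "target_url" "") = true
    · have hA' : pvGet l "target_url" "" ∈ allowed := (PySem.Set.contains_iff _ _).mp hA
      by_cases hE : PySem.Str.strip (pvGet l "anchor_text" "") = ""
      · simp [pvG, hA', hE, ih]
      · by_cases hS : pvGet l "target_url" "" ∈ seen
        · rw [List.filter_cons_of_pos (by simp [hA', hE])]
          simp only [pvG, List.map_cons]
          rw [if_neg (by simp [hS])]
          simp [pvDedupFrom, pvKeyOf_mkCand, hS, ih]
        · rw [List.filter_cons_of_pos (by simp [hA', hE])]
          simp only [pvG, List.map_cons]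
          rw [if_pos ⟨hA, hE, hS⟩]
          simp [pvDedupFrom, pvKeyOf_mkCand, hS, ih]
    · have hA' : pvGet l "target_url" "" ∉ allowed := fun h => hA ((PySem.Set.contains_iff _ _).mpr h)
      rw [List.filter_cons_of_neg (by simp [hA'])]
      simp only [pvG]
      rw [if_neg (by rintro ⟨h1, _, _⟩; exact hA h1)]
      exact ih (i + 1) seen

-- every pair of pvG carries the link sitting at its index (relative to the walked suffix)
theorem pvG_elem (allowed : PySem.Set String) :
    ∀ (rest : List (List (String × String))) (i : Nat) (seen : List String),
    ∀ p ∈ pvG allowed i rest seen,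
      ∃ k, p.1 = i + k ∧ rest.getD k [] = p.2 := by
  intro rest
  induction rest with
  | nil => intro i seen p hp; simp [pvG] at hp
  | cons l t ih =>
    intro i seen p hp
    by_cases h : PySem.Set.contains allowed (pvGet l "target_url" "") = true ∧
        PySem.Str.strip (pvGet l "anchor_text" "") ≠ "" ∧ pvGet l "target_url" "" ∉ seen
    · rw [pvG, if_pos h, List.mem_cons] at hp
      rcases hp with hp | hp
      · exact ⟨0, by simp [hp]⟩
      · obtain ⟨k, hk1, hk2⟩ := ih (i + 1) _ p hp
        exact ⟨k + 1, by omega, by simpa using hk2⟩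
    · rw [pvG, if_neg h] at hp
      obtain ⟨k, hk1, hk2⟩ := ih (i + 1) seen p hp
      exact ⟨k + 1, by omega, by simpa using hk2⟩

-- indices in pvG are ≥ the starting index
theorem pvG_fst_ge (allowed : PySem.Set String) :
    ∀ (rest : List (List (String × String))) (i : Nat) (seen : List String),
    ∀ p ∈ pvG allowed i rest seen, i ≤ p.1 := by
  intro rest
  induction rest with
  | nil => intro i seen p hp; simp [pvG] at hp
  | cons l t ih =>
    intro i seen p hp
    by_cases h : PySem.Set.contains allowed (pvGet l "target_url" "") = true ∧
        PySem.Str.strip (pvGet l "anchor_text" "") ≠ "" ∧ pvGet l "target_url" "" ∉ seen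
    · rw [pvG, if_pos h, List.mem_cons] at hp
      rcases hp with hp | hp
      · simp [hp]
      · have := ih (i + 1) _ p hp; omega
    · rw [pvG, if_neg h] at hp
      have := ih (i + 1) seen p hp; omega

-- indices in pvG are strictly increasing
theorem pvG_pairwise (allowed : PySem.Set String) :
    ∀ (rest : List (List (String × String))) (i : Nat) (seen : List String),
    (pvG allowed i rest seen).Pairwise (fun a b => a.1 < b.1) := by
  intro rest
  induction rest with
  | nil => intro i seen; simp [pvG]
  | cons l t ih =>
    intro i seen
    by_cases h : PySem.Set.contains allowed (pvGet l "target_url" "") = true ∧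
        PySem.Str.strip (pvGet l "anchor_text" "") ≠ "" ∧ pvGet l "target_url" "" ∉ seen
    · rw [pvG, if_pos h]
      refine List.Pairwise.cons ?_ (ih (i + 1) _)
      intro p hp
      have := pvG_fst_ge allowed t (i + 1) _ p hp
      simp; omega
    · rw [pvG, if_neg h]; exact ih (i + 1) seen

-- membership characterisation of pvG's (index, url) pairs via findIdx?
theorem pvG_char (allowed : PySem.Set String) (i : Nat) (u : String) :
    ∀ (rest : List (List (String × String))) (i0 : Nat) (seen : List String),
    ((i, u) ∈ (pvG allowed i0 rest seen).map (fun p => (p.1, pvGet p.2 "target_url" ""))) ↔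
      (∃ k, rest.findIdx? (fun link =>
          pvGet link "target_url" "" == u &&
          !(PySem.Str.strip (pvGet link "anchor_text" "") == "")) = some k ∧ i = i0 + k) ∧
        PySem.Set.contains allowed u = true ∧ u ∉ seen := by
  intro rest
  induction rest with
  | nil => intro i0 seen; simp [pvG]
  | cons l t ih =>
    intro i0 seen
    by_cases hu : pvGet l "target_url" "" = u
    · by_cases hE : PySem.Str.strip (pvGet l "anchor_text" "") = ""
      · -- empty anchor: l is skipped on both sides
        have hpred : (pvGet l "target_url" "" == u &&
            !(PySem.Str.strip (pvGet l "anchor_text" "") == "")) = false := by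
          simp [hE]
        rw [List.findIdx?_cons, hpred, if_neg Bool.false_ne_true]
        have hnG : ¬ (PySem.Set.contains allowed (pvGet l "target_url" "") = true ∧
            PySem.Str.strip (pvGet l "anchor_text" "") ≠ "" ∧ pvGet l "target_url" "" ∉ seen) := by
          intro ⟨_, h2, _⟩; exact h2 hE
        rw [pvG, if_neg hnG]
        rw [ih (i0 + 1) seen]
        constructor
        · rintro ⟨⟨k, hk, hik⟩, hc, hs⟩
          exact ⟨⟨k + 1, by simp [hk], by omega⟩, hc, hs⟩
        · rintro ⟨⟨k, hk, hik⟩, hc, hs⟩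
          simp only [Option.map_eq_some_iff] at hk
          obtain ⟨k', hk', rfl⟩ := hk
          exact ⟨⟨k', hk', by omega⟩, hc, hs⟩
      · -- l matches u with nonempty anchor: findIdx? = some 0
        have hpred : (pvGet l "target_url" "" == u &&
            !(PySem.Str.strip (pvGet l "anchor_text" "") == "")) = true := by
          simp [hu, hE]
        rw [List.findIdx?_cons, hpred, if_pos rfl]
        by_cases hok : PySem.Set.contains allowed (pvGet l "target_url" "") = true ∧
            PySem.Str.strip (pvGet l "anchor_text" "") ≠ "" ∧ pvGet l "target_url" "" ∉ seen
        · rw [pvG, if_pos hok]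
          simp only [List.map_cons, List.mem_cons]
          rw [ih (i0 + 1) (seen ++ [pvGet l "target_url" ""])]
          constructor
          · rintro (hp | ⟨⟨k, _, _⟩, hc, hs⟩)
            · injection hp with h1 h2
              subst h1; subst h2
              exact ⟨⟨0, rfl, by omega⟩, hok.1, hok.2.2⟩
            · exfalso; exact hs (by simp [hu])
          · rintro ⟨⟨k, hk, hik⟩, hc, hs⟩
            left
            injection hk with hk0
            subst hk0
            have : i = i0 := by omega
            simp [this, hu]
        · -- l's url already seen or not allowed: both sides are false
          rw [pvG, if_neg hok]
          rw [ih (i0 + 1) seen]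
          constructor
          · rintro ⟨⟨k, hk, hik⟩, hc, hs⟩
            exfalso
            -- the tail cannot contain u's first index: contradiction with hok
            rcases not_and_or.mp hok with h1 | h2
            · exact h1 (by rwa [hu])
            · rcases not_and_or.mp h2 with h3 | h4
              · exact h3 (by by_contra h; exact hE (by simpa using h))
              · exact h4 (fun hm => hs (by rwa [hu] at hm))
          · rintro ⟨⟨k, hk, hik⟩, hc, hs⟩
            exfalso
            rcases not_and_or.mp hok with h1 | h2
            · exact h1 (by rwa [hu])
            · rcases not_and_or.mp h2 with h3 | h4
              · exact h3 (by by_contra h; exact hE (by simpa using h))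
              · exact h4 (fun hm => hs (by rwa [hu] at hm))
    · -- l's url differs from u: predicate false, pvG head (if any) is not (i, u)
      have hpred : (pvGet l "target_url" "" == u &&
          !(PySem.Str.strip (pvGet l "anchor_text" "") == "")) = false := by
        simp [hu]
      rw [List.findIdx?_cons, hpred, if_neg Bool.false_ne_true]
      by_cases hok : PySem.Set.contains allowed (pvGet l "target_url" "") = true ∧
          PySem.Str.strip (pvGet l "anchor_text" "") ≠ "" ∧ pvGet l "target_url" "" ∉ seen
      · rw [pvG, if_pos hok]
        simp only [List.map_cons, List.mem_cons]
        rw [ih (i0 + 1) (seen ++ [pvGet l "target_url" ""])]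
        constructor
        · rintro (hp | ⟨⟨k, hk, hik⟩, hc, hs⟩)
          · exfalso; injection hp with a b; exact hu b.symm
          · refine ⟨⟨k + 1, by simp [hk], by omega⟩, hc, fun hm => hs (by simp [hm])⟩
        · rintro ⟨⟨k, hk, hik⟩, hc, hs⟩
          right
          simp only [Option.map_eq_some_iff] at hk
          obtain ⟨k', hk', rfl⟩ := hk
          refine ⟨⟨k', hk', by omega⟩, hc, ?_⟩
          simp only [List.mem_append, List.mem_singleton]
          rintro (hm | hm)
          · exact hs hm
          · exact hu hm.symm
      · rw [pvG, if_neg hok]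
        rw [ih (i0 + 1) seen]
        constructor
        · rintro ⟨⟨k, hk, hik⟩, hc, hs⟩
          exact ⟨⟨k + 1, by simp [hk], by omega⟩, hc, hs⟩
        · rintro ⟨⟨k, hk, hik⟩, hc, hs⟩
          simp only [Option.map_eq_some_iff] at hk
          obtain ⟨k', hk', rfl⟩ := hk
          exact ⟨⟨k', hk', by omega⟩, hc, hs⟩

-- B's unsorted hit list has the same members as pvG's (index, url) projection
theorem pvHits_mem (ai_links : List (List (String × String))) (allowed : PySem.Set String)
    (i : Nat) (u : String) :
    ((i, u) ∈ allowed.filterMap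
        (fun url => (pvFirstValidIndex ai_links url).map (fun j => (j, url)))) ↔
      ((i, u) ∈ (pvG allowed 0 ai_links []).map (fun p => (p.1, pvGet p.2 "target_url" ""))) := by
  rw [pvG_char]
  simp only [List.mem_filterMap, Option.map_eq_some_iff]
  constructor
  · rintro ⟨url, hmem, j, hfind, heq⟩
    injection heq with h1 h2
    subst h1; subst h2
    exact ⟨⟨j, hfind, by omega⟩, (PySem.Set.contains_iff _ _).mpr hmem, by simp⟩
  · rintro ⟨⟨k, hk, hik⟩, hc, _⟩
    exact ⟨u, (PySem.Set.contains_iff _ _).mp hc, k, hk, by simp [hik]⟩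

-- output record for a pvG pair = A's candidate record
theorem pvMkOut_eq_cand (ai_links : List (List (String × String))) (allowed : PySem.Set String) :
    ∀ p ∈ pvG allowed 0 ai_links [],
      pvMkOut ai_links (p.1, pvGet p.2 "target_url" "") = pvMkCand p.2 := by
  intro p hp
  obtain ⟨k, hk1, hk2⟩ := pvG_elem allowed ai_links 0 [] p hp
  simp only [Nat.zero_add] at hk1
  rw [List.getD_eq_getElem?_getD] at hk2
  simp [pvMkOut, pvMkCand, hk1, hk2]

-- ===== VERDICT (by name: the statement is the Claim_ definition above) =====
theorem validate_ai_links_spec : Claim_equal_validate_ai_links := by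
  intro ai_links allowed_targets _ _
  show validate_ai_links ai_links allowed_targets = validate_ai_links_alt ai_links allowed_targets
  unfold validate_ai_links validate_ai_links_alt
  set allowed := pvAllowedUrls allowed_targets with hal
  set M := (pvG allowed 0 ai_links []).map (fun p => (p.1, pvGet p.2 "target_url" "")) with hM
  set hits := allowed.filterMap
      (fun url => (pvFirstValidIndex ai_links url).map (fun i => (i, url))) with hhits
  -- the sort names M: a permutation of hits with strictly increasing keys
  have hMnodupfst : M.Pairwise (fun a b => a.1 < b.1) := by
    rw [hM]
    exact List.Pairwise.map _ (fun a b h => h) (pvG_pairwise allowed ai_links 0 [])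
  have hMnodup : M.Nodup := hMnodupfst.imp (fun h => by intro he; rw [he] at h; omega)
  have hhitsnodup : hits.Nodup := by
    rw [hhits]
    refine List.Nodup.filterMap ?_ ?_
    · intro a a' b hb hb'
      simp only [Option.mem_def, Option.map_eq_some_iff] at hb hb'
      obtain ⟨_, _, hb2⟩ := hb
      obtain ⟨_, _, hb2'⟩ := hb'
      rw [← hb2] at hb2'
      injection hb2' with _ h2
      exact h2.symm
    · have := PySem.Set.nodup_ofList (allowed_targets.map (fun item => pvGet item "target_url" ""))
      exact this
  have hperm : M.Perm hits := by
    rw [(List.perm_ext_iff_of_nodup hMnodup hhitsnodup)]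
    rintro ⟨i, u⟩
    exact (pvHits_mem ai_links allowed i u).symm
  have hsorted : PySem.List.sorted hits (fun h => h.1) false = M :=
    PySem.List.sorted_eq_of_perm_of_pairwise_lt hits M (fun h => h.1) hperm hMnodupfst
  show pvLoopA allowed ai_links [] PySem.Set.empty =
      ((PySem.List.sorted hits (fun h => h.1) false).take 3).map (pvMkOut ai_links)
  -- now both sides are take-3 of the same deduped list
  have hmain : ((pvG allowed 0 ai_links []).map (fun p => pvMkCand p.2)).take 3 =
      (M.take 3).map (pvMkOut ai_links) := by
    rw [hM, ← List.map_take, ← List.map_take, List.map_map]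
    exact List.map_congr_left fun p hp =>
      (pvMkOut_eq_cand ai_links allowed p (List.mem_of_mem_take hp)).symm
  rw [hsorted]
  rw [pvLoopA_eq allowed ai_links [] PySem.Set.empty (by simp)]
  simp only [List.nil_append, List.length_nil, Nat.sub_zero]
  rw [← pvG_dedup allowed ai_links 0 PySem.Set.empty]
  show ((pvG allowed 0 ai_links []).map (fun p => pvMkCand p.2)).take 3 =
      (M.take 3).map (pvMkOut ai_links)
  exact hmain
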